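-- pv_equiv track=rewrite | github.com/TaDpoleO/Python-Education | Yandex/Algorithm Training/Algorithm Training 2/Division B/Contest 8/E.py | compactTreeToTree
-- ===== SOURCE A (Python) =====
-- def compactTreeToTree(compact_tree):
--     root = ['', None, None, None] # val, left, right, up
--
--     res = []
--     curr_node, curr_code = root, []
--     for ch in compact_tree:
--         if ch == 'D':
--             if curr_node[1] is None:
--                 curr_node[1] = ['0', None, None, curr_node]
--                 curr_node = curr_node[1]
--                 curr_code.append('0')
--             elif curr_node[2] is None:
--                 curr_node[2] = ['1', None, None, curr_node]
--                 curr_node = curr_node[2]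
--                 curr_code.append('1')
--         elif ch == 'U':
--             res.append(''.join(curr_code))
--
--             while curr_node[0] == '1':
--                 curr_node = curr_node[3]
--                 curr_code.pop()
--
--             if curr_node[0] == '0':
--                 curr_node = curr_node[3]
--                 curr_node[2] = ['1', None, None, curr_node]
--                 curr_node = curr_node[2]
--                 curr_code.pop()
--                 curr_code.append('1')
--
--     res.append(''.join(curr_code))
--     return res
-- ===== SOURCE B (Python) =====
-- def _bits(n, length):
--     # binary representation of n padded to `length` digits, built LSB-first
--     out = []
--     for _ in range(length):
--         out.append('1' if n % 2 else '0')
--         n //= 2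
--     return ''.join(reversed(out))
--
--
-- def compactTreeToTree(compact_tree):
--     # The current path is a binary counter: value `n` of `length` bits.
--     # 'D' appends a 0-bit; 'U' emits the code, then increments the counter,
--     # dropping trailing zeros (overflow = back at the root, which is full).
--     # `root` counts the root's children (only consulted at zero length).
--     res = []
--     n = length = root = 0
--     for ch in compact_tree:
--         if ch == 'D':
--             if length:
--                 n *= 2
--                 length += 1
--             elif root == 0:
--                 n, length, root = 0, 1, 1
--             elif root == 1:
--                 n, length, root = 1, 1, 2
--         elif ch == 'U':
--             res.append(_bits(n, length))
--             if length:
--                 m = n + 1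
--                 if m == 1 << length:
--                     n, length, root = 0, 0, 2
--                 else:
--                     while m % 2 == 0:
--                         m //= 2
--                         length -= 1
--                     n = m
--     res.append(_bits(n, length))
--     return res
-- ===== Notes on version B (the rewrite author's own statement) =====
-- stated objective: alternative
-- what changed: Replaced A's explicit mutable binary tree of [val,left,right,up] nodes and pointer walking by a binary counter: the current path is an integer value plus a bit length, 'D' appends a 0-bit (n*=2), and 'U' backtracks by arithmetic increment n+1 with trailing zeros stripped (overflow = root exhausted); codes are rendered from the integer on demand.
import Mathlib
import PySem

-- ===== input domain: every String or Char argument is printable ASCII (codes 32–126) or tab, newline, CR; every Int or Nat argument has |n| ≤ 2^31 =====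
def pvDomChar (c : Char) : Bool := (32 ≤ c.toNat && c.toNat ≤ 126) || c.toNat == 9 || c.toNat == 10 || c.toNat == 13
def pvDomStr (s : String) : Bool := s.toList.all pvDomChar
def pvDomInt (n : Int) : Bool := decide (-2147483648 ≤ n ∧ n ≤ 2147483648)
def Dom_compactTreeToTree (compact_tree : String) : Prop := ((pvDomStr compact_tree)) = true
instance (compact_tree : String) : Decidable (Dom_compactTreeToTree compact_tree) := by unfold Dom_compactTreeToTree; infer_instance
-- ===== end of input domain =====

-- B drops A's mutable tree of [val,left,right,up] nodes: the current path is a binary counter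
-- (integer value + bit length); 'U' backtracks by incrementing and stripping trailing zeros. Objective: alternative.

-- ===== PORT A =====
-- A mutates a tree of ['val', left, right, up] lists and walks it with a current pointer.
-- Ported as a zipper: the focus node's (val, left, right) plus the path context, each context
-- entry (parent val, came-from-left?, the OTHER child of the parent); curr_code is a Char list
-- in Python's order (append = ++ [c], pop = dropLast), ''.join(curr_code) = String.mk code.
inductive PTree where
  | nil : PTree
  | node : String → PTree → PTree → PTree
deriving DecidableEq, Repr

structure AState where
  res  : List String
  v    : String
  l    : PTree
  r    : PTree
  ctx  : List (String × Bool × PTree)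
  code : List Char
deriving Repr

-- the `while curr_node[0] == '1'` loop: go up (reattach the focus on the recorded side), pop a bit
def whileA (v : String) (l r : PTree) (ctx : List (String × Bool × PTree)) (code : List Char) :
    String × PTree × PTree × List (String × Bool × PTree) × List Char :=
  if v = "1" then
    match ctx with
    | [] => (v, l, r, [], code)   -- unreachable from the initial state (root val is "")
    | (pv, cl, other) :: ctx' =>
      if cl then whileA pv (PTree.node v l r) other ctx' code.dropLast
      else whileA pv other (PTree.node v l r) ctx' code.dropLast
  else (v, l, r, ctx, code)

def stepA (s : AState) (ch : Char) : AState :=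
  if ch = 'D' then
    if s.l = PTree.nil then
      ⟨s.res, "0", PTree.nil, PTree.nil, (s.v, true, s.r) :: s.ctx, s.code ++ ['0']⟩
    else if s.r = PTree.nil then
      ⟨s.res, "1", PTree.nil, PTree.nil, (s.v, false, s.l) :: s.ctx, s.code ++ ['1']⟩
    else s
  else if ch = 'U' then
    let res' := s.res ++ [String.mk s.code]
    match whileA s.v s.l s.r s.ctx s.code with
    | (v', l', r', ctx', code') =>
      if v' = "0" then
        match ctx' with
        | [] => ⟨res', v', l', r', [], code'⟩   -- unreachable (curr_node[3] is None only at the root, val "")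
        | (pv, cl, other) :: ctx'' =>
          -- go up, overwrite the parent's right child with a fresh '1' node, move into it
          let pl := if cl then PTree.node v' l' r' else other
          ⟨res', "1", PTree.nil, PTree.nil, (pv, false, pl) :: ctx'', code'.dropLast ++ ['1']⟩
      else ⟨res', v', l', r', ctx', code'⟩
  else s

def compactTreeToTree (compact_tree : String) : List String :=
  let s := compact_tree.toList.foldl stepA ⟨[], "", PTree.nil, PTree.nil, [], []⟩
  s.res ++ [String.mk s.code]

-- ===== PORT B =====
-- Source B: no tree at all; the current path is the number `n` of `len` bits, `root` the root's
-- child count. _bits builds the digits LSB-first and reverses (rbitsB = the LSB-first list).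
def rbitsB : Nat → Nat → List Char
  | _, 0 => []
  | n, l + 1 => (if n % 2 = 1 then '1' else '0') :: rbitsB (n / 2) l

def bitsB (n l : Nat) : String := String.mk ((rbitsB n l).reverse)

-- `while m % 2 == 0: m //= 2; length -= 1` (the m = 0 guard only makes it total; m ≥ 1 at every call)
def stripB (m l : Nat) : Nat × Nat :=
  if h : m ≠ 0 ∧ m % 2 = 0 then stripB (m / 2) (l - 1) else (m, l)
  termination_by m
  decreasing_by exact Nat.div_lt_self (Nat.pos_of_ne_zero h.1) one_lt_two

structure BState where
  res  : List String
  n    : Nat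
  len  : Nat
  root : Nat
deriving Repr

def stepB (s : BState) (ch : Char) : BState :=
  if ch = 'D' then
    if s.len ≠ 0 then ⟨s.res, s.n * 2, s.len + 1, s.root⟩
    else if s.root = 0 then ⟨s.res, 0, 1, 1⟩
    else if s.root = 1 then ⟨s.res, 1, 1, 2⟩
    else s
  else if ch = 'U' then
    let res' := s.res ++ [bitsB s.n s.len]
    if s.len ≠ 0 then
      let m := s.n + 1
      if m = 2 ^ s.len then ⟨res', 0, 0, 2⟩   -- 1 << length
      else
        let p := stripB m s.len
        ⟨res', p.1, p.2, s.root⟩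
    else ⟨res', s.n, s.len, s.root⟩
  else s

def compactTreeToTree_alt (compact_tree : String) : List String :=
  let s := compact_tree.toList.foldl stepB ⟨[], 0, 0, 0⟩
  s.res ++ [bitsB s.n s.len]

-- ===== PRECONDITION & SPEC =====
def Spec_compactTreeToTree (compact_tree : String) (out : List String) : Prop := out = compactTreeToTree_alt compact_tree
instance (compact_tree : String) (out : List String) : Decidable (Spec_compactTreeToTree compact_tree out) := by unfold Spec_compactTreeToTree; infer_instance

-- ===== CLAIM (what is proved, stated in full; the proofs are below) =====
def Claim_equal_compactTreeToTree : Prop := ∀ (compact_tree : String), Dom_compactTreeToTree compact_tree → Spec_compactTreeToTree compact_tree (compactTreeToTree compact_tree)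

-- ===== LEMMAS AND PROOFS =====

-- children count of a focus node / of a context entry's parent (as seen when we re-ascend into it)
def chCount (l r : PTree) : Nat :=
  if l = PTree.nil then 0 else if r = PTree.nil then 1 else 2

def ctxCount : String × Bool × PTree → Nat
  | (_, true, other) => if other = PTree.nil then 1 else 2
  | (_, false, _) => 2

def bitStr (c : Char) : String := String.mk [c]

-- the child count of the node sitting above a path bit: 1 below a '0', 2 below a '1'
def toCount (c : Char) : Nat := if c = '0' then 1 else 2

-- the counts of all nodes on the path, deepest first, as determined by (n, len, root)
def countsL (n len root : Nat) : List Nat :=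
  if len = 0 then [root] else 0 :: (rbitsB n len).map toCount

-- simulation invariant between the two loop states
def SimInv (a : AState) (b : BState) : Prop :=
  a.res = b.res ∧
  a.code = (rbitsB b.n b.len).reverse ∧
  b.n < 2 ^ b.len ∧
  a.v :: a.ctx.map (·.1) = (rbitsB b.n b.len).map bitStr ++ [""] ∧
  chCount a.l a.r :: a.ctx.map ctxCount = countsL b.n b.len b.root ∧
  (a.r ≠ PTree.nil → a.l ≠ PTree.nil) ∧
  (∀ e ∈ a.ctx, e.2.1 = false → e.2.2 ≠ PTree.nil)

lemma bitStr_zero : bitStr '0' = "0" := by decide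
lemma bitStr_one : bitStr '1' = "1" := by decide

lemma chCount_two {l r : PTree} (h : chCount l r = 2) : l ≠ PTree.nil ∧ r ≠ PTree.nil := by
  unfold chCount at h; split_ifs at h <;> simp_all

-- A's while loop, on a path of `len` bits encoding `n`, as arithmetic: it either empties the
-- path (n is all ones) or stops at the state encoded by stripB (n+1) len.
lemma whileA_arith : ∀ (len n : Nat) (v : String) (l r : PTree)
    (ctx : List (String × Bool × PTree)),
    n < 2 ^ len →
    v :: ctx.map (·.1) = (rbitsB n len).map bitStr ++ [""] →
    ctx.map ctxCount = (rbitsB n len).map toCount →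
    (∀ e ∈ ctx, e.2.1 = false → e.2.2 ≠ PTree.nil) →
    (n + 1 = 2 ^ len →
      ∃ l' r', whileA v l r ctx ((rbitsB n len).reverse) = ("", l', r', [], []) ∧
        (len ≠ 0 → chCount l' r' = 2) ∧ (len = 0 → l' = l ∧ r' = r)) ∧
    (n + 1 ≠ 2 ^ len →
      ∃ m l' pv cl other ctx0 l0 r0,
        stripB (n + 1) len = (m, l') ∧ m % 2 = 1 ∧ 1 ≤ l' ∧ m < 2 ^ l' ∧
        whileA v l r ctx ((rbitsB n len).reverse)
          = ("0", l0, r0, (pv, cl, other) :: ctx0, (rbitsB (m - 1) l').reverse) ∧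
        pv :: ctx0.map (·.1) = (rbitsB (m / 2) (l' - 1)).map bitStr ++ [""] ∧
        ctx0.map ctxCount = (rbitsB (m / 2) (l' - 1)).map toCount ∧
        (cl = false → other ≠ PTree.nil) ∧
        (∀ e ∈ ctx0, e.2.1 = false → e.2.2 ≠ PTree.nil)) := by
  intro len
  induction len with
  | zero =>
      intro n v l r ctx hn hv hc hwf
      have hn0 : n = 0 := by omega
      subst hn0
      have hv' : v :: ctx.map (·.1) = [""] := by simpa [rbitsB] using hv
      have hveq : v = "" := (List.cons_eq_cons.mp hv').1
      have hctx : ctx = [] := by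
        have := (List.cons_eq_cons.mp hv').2; simpa using this
      subst hctx
      constructor
      · intro _
        refine ⟨l, r, ?_, by simp, fun _ => ⟨rfl, rfl⟩⟩
        rw [whileA.eq_def]
        simp [rbitsB, hveq]
      · intro hne; exact absurd (by norm_num) hne
  | succ len ih =>
      intro n v l r ctx hn hv hc hwf
      have hpow : 2 ^ (len + 1) = 2 * 2 ^ len := by ring
      have hrb : rbitsB n (len + 1) = (if n % 2 = 1 then '1' else '0') :: rbitsB (n / 2) len := rfl
      cases ctx with
      | nil =>
          exfalso
          have := congrArg List.length hv
          simp [hrb] at this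
      | cons e ctx' =>
        obtain ⟨pv, cl, other⟩ := e
        rw [hrb] at hv hc
        simp only [List.map_cons, List.cons_append] at hv hc
        have hveq : v = bitStr (if n % 2 = 1 then '1' else '0') := (List.cons_eq_cons.mp hv).1
        have hvtl : pv :: ctx'.map (·.1) = (rbitsB (n / 2) len).map bitStr ++ [""] := by
          have := (List.cons_eq_cons.mp hv).2; simpa using this
        have hchd : ctxCount (pv, cl, other) = toCount (if n % 2 = 1 then '1' else '0') :=
          (List.cons_eq_cons.mp hc).1
        have hctl : ctx'.map ctxCount = (rbitsB (n / 2) len).map toCount :=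
          (List.cons_eq_cons.mp hc).2
        have hwf' : ∀ e ∈ ctx', e.2.1 = false → e.2.2 ≠ PTree.nil := fun e he => hwf e (by simp [he])
        by_cases hpar : n % 2 = 1
        · -- last bit '1': A's loop strips it; arithmetically the carry propagates one step
          rw [if_pos hpar] at hveq hchd hrb
          have hv1 : v = "1" := by rw [hveq, bitStr_one]
          have hk : n / 2 < 2 ^ len := by omega
          have hcode : (rbitsB n (len + 1)).reverse = (rbitsB (n / 2) len).reverse ++ ['1'] := by
            rw [hrb]; simp
          have hiff : (n + 1 = 2 ^ (len + 1)) ↔ (n / 2 + 1 = 2 ^ len) := by omega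
          -- the new focus after one ascent
          have main : ∀ nl nr : PTree,
              whileA v l r ((pv, cl, other) :: ctx') ((rbitsB n (len + 1)).reverse)
                = whileA pv nl nr ctx' ((rbitsB (n / 2) len).reverse) →
              chCount nl nr = 2 →
              (n + 1 = 2 ^ (len + 1) →
                ∃ l' r', whileA v l r ((pv, cl, other) :: ctx') ((rbitsB n (len + 1)).reverse) = ("", l', r', [], []) ∧
                  (len + 1 ≠ 0 → chCount l' r' = 2) ∧ (len + 1 = 0 → l' = l ∧ r' = r)) ∧
              (n + 1 ≠ 2 ^ (len + 1) →
                ∃ m l' pv' cl' other' ctx0 l0 r0,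
                  stripB (n + 1) (len + 1) = (m, l') ∧ m % 2 = 1 ∧ 1 ≤ l' ∧ m < 2 ^ l' ∧
                  whileA v l r ((pv, cl, other) :: ctx') ((rbitsB n (len + 1)).reverse)
                    = ("0", l0, r0, (pv', cl', other') :: ctx0, (rbitsB (m - 1) l').reverse) ∧
                  pv' :: ctx0.map (·.1) = (rbitsB (m / 2) (l' - 1)).map bitStr ++ [""] ∧
                  ctx0.map ctxCount = (rbitsB (m / 2) (l' - 1)).map toCount ∧
                  (cl' = false → other' ≠ PTree.nil) ∧
                  (∀ e ∈ ctx0, e.2.1 = false → e.2.2 ≠ PTree.nil)) := by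
            intro nl nr hstep hch
            obtain ⟨IH1, IH2⟩ := ih (n / 2) pv nl nr ctx' hk hvtl hctl hwf'
            constructor
            · intro hall
              obtain ⟨l', r', hwa, h2', h0'⟩ := IH1 (hiff.mp hall)
              refine ⟨l', r', by rw [hstep]; exact hwa, fun _ => ?_, fun hh => absurd hh (by omega)⟩
              by_cases hlz : len = 0
              · obtain ⟨e1, e2⟩ := h0' hlz; rw [e1, e2]; exact hch
              · exact h2' hlz
            · intro hne
              obtain ⟨m, l', pv', cl', other', ctx0, l0, r0, hstrip, hodd, hl1, hlt, hwa,
                hv0, hc0, hcl0, hwf0⟩ := IH2 (fun hh => hne (hiff.mpr hh))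
              refine ⟨m, l', pv', cl', other', ctx0, l0, r0, ?_, hodd, hl1, hlt,
                by rw [hstep]; exact hwa, hv0, hc0, hcl0, hwf0⟩
              rw [stripB]
              rw [dif_pos ⟨by omega, by omega⟩]
              have e1 : (n + 1) / 2 = n / 2 + 1 := by omega
              simpa [e1] using hstrip
          cases cl with
          | true =>
              have hother : other ≠ PTree.nil := by
                intro hh
                rw [hh] at hchd
                simp [ctxCount, toCount] at hchd
              refine main (PTree.node "1" l r) other ?_ (by simp [chCount, hother]) 
              rw [hcode, whileA.eq_def]
              simp [hv1]
          | false =>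
              have hother : other ≠ PTree.nil := hwf (pv, false, other) (by simp) rfl
              refine main other (PTree.node "1" l r) ?_ (by simp [chCount, hother])
              rw [hcode, whileA.eq_def]
              simp [hv1]
        · -- last bit '0': A's loop stops here; the increment is carry-free
          rw [if_neg hpar] at hveq hchd hrb
          have hv0eq : v = "0" := by rw [hveq, bitStr_zero]
          constructor
          · intro hall; exfalso; omega
          · intro hne
            refine ⟨n + 1, len + 1, pv, cl, other, ctx', l, r, ?_, by omega, by omega, by omega,
              ?_, ?_, ?_, fun hh => hwf (pv, cl, other) (by simp) hh, hwf'⟩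
            · rw [stripB]; rw [dif_neg (by omega)]
            · rw [whileA.eq_def]
              have : ¬ v = "1" := by rw [hv0eq]; decide
              simp only [if_neg this]
              rw [hv0eq]
              simp [hrb, show n + 1 - 1 = n from rfl]
            · simpa [show (n + 1) / 2 = n / 2 from by omega] using hvtl
            · simpa [show (n + 1) / 2 = n / 2 from by omega] using hctl

lemma step_inv (a : AState) (b : BState) (ch : Char) (h : SimInv a b) :
    SimInv (stepA a ch) (stepB b ch) := by
  obtain ⟨ares, av, al, ar, actx, acode⟩ := a
  obtain ⟨bres, bn, blen, broot⟩ := b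
  obtain ⟨h1, h2, h3, h4, h5, h6, h7⟩ := h
  simp only at h1 h2 h3 h4 h5 h6 h7
  by_cases hD : ch = 'D'
  · subst hD
    by_cases hlen : blen = 0
    · -- at the root (empty path)
      subst hlen
      have hbn : bn = 0 := by simpa using h3
      subst hbn
      have h4' : av :: actx.map (·.1) = [""] := by simpa [rbitsB] using h4
      have hav : av = "" := (List.cons_eq_cons.mp h4').1
      have hactx : actx = [] := by
        have := (List.cons_eq_cons.mp h4').2; simpa using this
      subst hactx
      have h5' : chCount al ar = broot := by
        have := h5; simp [countsL] at this; exact this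
      by_cases hal : al = PTree.nil
      · have har : ar = PTree.nil := by
          by_contra har; exact (h6 har) hal
        have hroot : broot = 0 := by rw [← h5']; simp [chCount, hal]
        have eA : stepA ⟨ares, av, al, ar, [], acode⟩ 'D'
            = ⟨ares, "0", PTree.nil, PTree.nil, [(av, true, ar)], acode ++ ['0']⟩ := by
          simp [stepA, hal]
        have eB : stepB ⟨bres, 0, 0, broot⟩ 'D' = ⟨bres, 0, 1, 1⟩ := by
          simp [stepB, hroot]
        rw [eA, eB]
        have hc2 : acode = [] := by simpa [rbitsB] using h2
        refine ⟨h1, by simp [hc2, rbitsB], by norm_num, ?_, ?_, by simp, ?_⟩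
        · simp [rbitsB, bitStr_zero, hav]
        · simp [rbitsB, chCount, ctxCount, countsL, toCount, har]
        · intro e he hf; simp at he; rw [he] at hf; simp at hf
      · by_cases har : ar = PTree.nil
        · have hroot : broot = 1 := by rw [← h5']; simp [chCount, hal, har]
          have eA : stepA ⟨ares, av, al, ar, [], acode⟩ 'D'
              = ⟨ares, "1", PTree.nil, PTree.nil, [(av, false, al)], acode ++ ['1']⟩ := by
            simp [stepA, hal, har]
          have eB : stepB ⟨bres, 0, 0, broot⟩ 'D' = ⟨bres, 1, 1, 2⟩ := by
            simp [stepB, hroot]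
          rw [eA, eB]
          have hc2 : acode = [] := by simpa [rbitsB] using h2
          refine ⟨h1, by simp [hc2, rbitsB], by norm_num, ?_, ?_, by simp, ?_⟩
          · simp [rbitsB, bitStr_one, hav]
          · simp [rbitsB, chCount, ctxCount, countsL, toCount]
          · intro e he hf; simp at he; rw [he]; simpa using hal
        · -- root already full: both sides do nothing
          have hroot : broot = 2 := by rw [← h5']; simp [chCount, hal, har]
          have eA : stepA ⟨ares, av, al, ar, [], acode⟩ 'D'
              = ⟨ares, av, al, ar, [], acode⟩ := by simp [stepA, hal, har]
          have eB : stepB ⟨bres, 0, 0, broot⟩ 'D' = ⟨bres, 0, 0, broot⟩ := by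
            simp [stepB, hroot]
          rw [eA, eB]
          exact ⟨h1, h2, h3, h4, h5, h6, h7⟩
    · -- on a nonempty path: the focus is always a fresh leaf, so 'D' appends a 0-bit
      have h5' : chCount al ar :: actx.map ctxCount = 0 :: (rbitsB bn blen).map toCount := by
        have := h5; simp only [countsL, if_neg hlen] at this; exact this
      have hch0 : chCount al ar = 0 := (List.cons_eq_cons.mp h5').1
      have hctl : actx.map ctxCount = (rbitsB bn blen).map toCount := (List.cons_eq_cons.mp h5').2
      have hal : al = PTree.nil := by
        by_contra hal; unfold chCount at hch0; rw [if_neg hal] at hch0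
        split_ifs at hch0
      have har : ar = PTree.nil := by
        by_contra har; exact (h6 har) hal
      have eA : stepA ⟨ares, av, al, ar, actx, acode⟩ 'D'
          = ⟨ares, "0", PTree.nil, PTree.nil, (av, true, ar) :: actx, acode ++ ['0']⟩ := by
        simp [stepA, hal]
      have eB : stepB ⟨bres, bn, blen, broot⟩ 'D' = ⟨bres, bn * 2, blen + 1, broot⟩ := by
        simp [stepB, hlen]
      rw [eA, eB]
      have hrb : rbitsB (bn * 2) (blen + 1) = '0' :: rbitsB bn blen := by
        simp [rbitsB, show bn * 2 % 2 = 0 from by omega, show bn * 2 / 2 = bn from by omega]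
      have hpow : 2 ^ (blen + 1) = 2 * 2 ^ blen := by ring
      refine ⟨h1, by simp [hrb, h2], by show bn * 2 < 2 ^ (blen + 1); omega, ?_, ?_, by simp, ?_⟩
      · simp only [hrb, List.map_cons, List.cons_append, bitStr_zero]
        simpa using h4
      · simp only [countsL, Nat.succ_ne_zero, hrb, List.map_cons]
        simp [chCount, ctxCount, toCount, har, hctl]
      · intro e he hf
        rcases List.mem_cons.mp he with he | he
        · rw [he] at hf; simp at hf
        · exact h7 e he hf
  · by_cases hU : ch = 'U'
    · subst hU
      have hemit : String.mk acode = bitsB bn blen := by rw [h2]; rfl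
      by_cases hlen : blen = 0
      · -- at the root: emit and stay
        subst hlen
        have h4' : av :: actx.map (·.1) = [""] := by simpa [rbitsB] using h4
        have hav : av = "" := (List.cons_eq_cons.mp h4').1
        have hactx : actx = [] := by
          have := (List.cons_eq_cons.mp h4').2; simpa using this
        subst hactx
        subst hav
        have ewhile : whileA "" al ar [] acode = ("", al, ar, [], acode) := by
          rw [whileA.eq_def]; simp
        have eA : stepA ⟨ares, "", al, ar, [], acode⟩ 'U'
            = ⟨ares ++ [String.mk acode], "", al, ar, [], acode⟩ := by
          simp [stepA, ewhile]
        have eB : stepB ⟨bres, bn, 0, broot⟩ 'U' = ⟨bres ++ [bitsB bn 0], bn, 0, broot⟩ := by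
          simp [stepB]
        rw [eA, eB]
        exact ⟨by rw [h1, hemit], h2, h3, h4, h5, h6, h7⟩
      · have h5' : chCount al ar :: actx.map ctxCount = 0 :: (rbitsB bn blen).map toCount := by
          have := h5; simp only [countsL, if_neg hlen] at this; exact this
        have hctl : actx.map ctxCount = (rbitsB bn blen).map toCount := (List.cons_eq_cons.mp h5').2
        obtain ⟨IH1, IH2⟩ := whileA_arith blen bn av al ar actx h3 h4 hctl h7
        by_cases hall : bn + 1 = 2 ^ blen
        · -- the path is all ones: A's loop climbs back to the root; B overflows to (0,0), root full
          obtain ⟨l', r', hwa, h2', -⟩ := IH1 hall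
          have hch2 := h2' hlen
          obtain ⟨hl', hr'⟩ := chCount_two hch2
          rw [← h2] at hwa
          have eA : stepA ⟨ares, av, al, ar, actx, acode⟩ 'U'
              = ⟨ares ++ [String.mk acode], "", l', r', [], []⟩ := by
            simp [stepA, hwa]
          have eB : stepB ⟨bres, bn, blen, broot⟩ 'U' = ⟨bres ++ [bitsB bn blen], 0, 0, 2⟩ := by
            simp [stepB, hlen, hall]
          rw [eA, eB]
          refine ⟨by rw [h1, hemit], by simp [rbitsB], by norm_num, by simp [rbitsB], ?_,
            fun _ => hl', by simp⟩
          simp [countsL, hch2]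
        · -- a 0-bit is flipped to 1: B's counter becomes stripB (n+1) len
          obtain ⟨m, l', pv, cl, other, ctx0, l0, r0, hstrip, hodd, hl1, hlt, hwa,
            hv0, hc0, hcl0, hwf0⟩ := IH2 hall
          obtain ⟨l'', rfl⟩ : ∃ l'', l' = l'' + 1 := ⟨l' - 1, by omega⟩
          have hrm : rbitsB m (l'' + 1) = '1' :: rbitsB (m / 2) l'' := by
            simp [rbitsB, hodd]
          have hrm0 : rbitsB (m - 1) (l'' + 1) = '0' :: rbitsB (m / 2) l'' := by
            simp [rbitsB, show (m - 1) % 2 = 0 from by omega, show (m - 1) / 2 = m / 2 from by omega]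
          rw [← h2] at hwa
          have eA : stepA ⟨ares, av, al, ar, actx, acode⟩ 'U'
              = ⟨ares ++ [String.mk acode], "1", PTree.nil, PTree.nil,
                 (pv, false, if cl then PTree.node "0" l0 r0 else other) :: ctx0,
                 ((rbitsB (m - 1) (l'' + 1)).reverse).dropLast ++ ['1']⟩ := by
            simp [stepA, hwa]
          have eB : stepB ⟨bres, bn, blen, broot⟩ 'U'
              = ⟨bres ++ [bitsB bn blen], m, l'' + 1, broot⟩ := by
            simp [stepB, hlen, hall, hstrip]
          rw [eA, eB]
          have hcode' : ((rbitsB (m - 1) (l'' + 1)).reverse).dropLast ++ ['1']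
              = (rbitsB m (l'' + 1)).reverse := by
            rw [hrm0, hrm]; simp
          refine ⟨by rw [h1, hemit], hcode', hlt, ?_, ?_, ?_, ?_⟩
          · simp only [hrm, List.map_cons, List.cons_append, bitStr_one]
            simpa using hv0
          · simp only [countsL, if_neg (Nat.succ_ne_zero l''), hrm, List.map_cons]
            have : ctx0.map ctxCount = (rbitsB (m / 2) l'').map toCount := by simpa using hc0
            simp [chCount, ctxCount, toCount, this]
          · intro hh; exact absurd rfl hh
          · intro e he hf
            rcases List.mem_cons.mp he with he | he
            · rw [he] at hf ⊢
              cases cl with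
              | true => simp
              | false => simpa using hcl0 rfl
            · exact hwf0 e he hf
    · have eA : stepA ⟨ares, av, al, ar, actx, acode⟩ ch = ⟨ares, av, al, ar, actx, acode⟩ := by
        simp [stepA, hD, hU]
      have eB : stepB ⟨bres, bn, blen, broot⟩ ch = ⟨bres, bn, blen, broot⟩ := by
        simp [stepB, hD, hU]
      rw [eA, eB]
      exact ⟨h1, h2, h3, h4, h5, h6, h7⟩

lemma fold_inv (cs : List Char) (a : AState) (b : BState) (h : SimInv a b) :
    SimInv (cs.foldl stepA a) (cs.foldl stepB b) := by
  induction cs generalizing a b with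
  | nil => exact h
  | cons c cs ih => exact ih _ _ (step_inv a b c h)

-- ===== VERDICT (by name: the statement is the Claim_ definition above) =====
theorem compactTreeToTree_spec : Claim_equal_compactTreeToTree := by
  intro s _
  have h0 : SimInv ⟨[], "", PTree.nil, PTree.nil, [], []⟩ ⟨[], 0, 0, 0⟩ :=
    ⟨rfl, rfl, by norm_num, rfl, by simp [chCount, countsL], by simp, by simp⟩
  obtain ⟨h1, h2, -, -, -, -, -⟩ := fold_inv s.toList _ _ h0
  unfold Spec_compactTreeToTree
  simp only [compactTreeToTree, compactTreeToTree_alt]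
  rw [h1, h2]
  rfl
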